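-- pv_equiv track=rewrite | github.com/meta-introspector/retro-sync | fixtures/scripts/hymn_stability.py | cl15_blade
-- ===== SOURCE A (Python) =====
-- def cl15_blade(ivs):
--     mv = {0: 1}
--     for iv in ivs:
--         idx = abs(iv) % 15
--         blade = 1 << idx
--         new = {}
--         for mask, coeff in mv.items():
--             result = mask ^ blade
--             sign = 1
--             for bit in range(idx):
--                 if mask & (1 << bit): sign *= -1
--             new[result] = new.get(result, 0) + coeff * sign
--         mv = {k: v for k, v in new.items() if v != 0}
--     return mv
-- ===== SOURCE B (Python) =====
-- def cl15_blade(ivs):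
--     mask = 0
--     coeff = 1
--     for iv in ivs:
--         idx = abs(iv) % 15
--         if (mask & ((1 << idx) - 1)).bit_count() % 2:
--             coeff = -coeff
--         mask ^= 1 << idx
--     return {mask: coeff}
-- ===== Notes on version B (the rewrite author's own statement) =====
-- stated objective: faster
-- what changed: Replaces A's singleton-dict rebuild and inner bit-by-bit sign loop (up to 14 iterations per blade) with two scalar state variables mask/coeff and a single bit_count parity test per blade.
import Mathlib
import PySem

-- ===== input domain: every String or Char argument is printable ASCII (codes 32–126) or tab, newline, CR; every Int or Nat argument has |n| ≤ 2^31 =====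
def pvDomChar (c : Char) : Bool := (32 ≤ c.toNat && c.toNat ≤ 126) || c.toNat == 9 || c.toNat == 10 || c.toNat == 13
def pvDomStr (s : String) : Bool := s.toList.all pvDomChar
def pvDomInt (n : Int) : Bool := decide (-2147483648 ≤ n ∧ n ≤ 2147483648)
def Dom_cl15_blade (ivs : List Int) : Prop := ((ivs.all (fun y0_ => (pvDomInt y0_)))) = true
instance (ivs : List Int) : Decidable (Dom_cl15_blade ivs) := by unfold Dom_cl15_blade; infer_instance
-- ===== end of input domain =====

-- B replaces A's singleton-dict state and inner bit-by-bit sign loop by two plain ints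
-- (mask, coeff) with the sign taken from the bit-count parity of the low bits of mask.


-- ===== PORT A =====
-- sign loop: for bit in range(idx): if mask & (1 << bit): sign *= -1
-- (bit ranges over 0..idx-1, all ≥ 0, so bit.toNat is exact)
def cl15Sign (mask : Int) (idx : Nat) : Int :=
  (PySem.List.pyRange 0 (idx : Int) 1).foldl
    (fun sign bit => if PySem.Int.band mask ((1 : Int) <<< bit.toNat) ≠ 0 then sign * (-1) else sign) 1

-- body of 'for mask, coeff in mv.items()'
def cl15Inner (idx : Nat) (blade : Int) (new : PySem.Dict Int Int) (p : Int × Int) : PySem.Dict Int Int :=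
  let result := PySem.Int.bxor p.1 blade
  let sign := cl15Sign p.1 idx
  new.insert result (new.getD result 0 + p.2 * sign)

-- body of 'for iv in ivs'; idx = abs(iv) % 15 is nonnegative, so .toNat is exact
def cl15Step (mv : PySem.Dict Int Int) (iv : Int) : PySem.Dict Int Int :=
  let idx : Nat := (PySem.Int.mod |iv| 15).toNat
  let blade : Int := (1 : Int) <<< idx
  let new := mv.items.foldl (cl15Inner idx blade) PySem.Dict.empty
  PySem.Dict.ofList (new.items.filter (fun p => p.2 != 0))

def cl15_blade (ivs : List Int) : List (Int × Int) :=
  (ivs.foldl cl15Step (PySem.Dict.ofList [(0, 1)])).items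

-- ===== PORT B =====
-- one blade step on the state (mask, coeff); idx = abs(iv) % 15 ≥ 0, so .toNat is exact
def cl15AltStep (st : Int × Int) (iv : Int) : Int × Int :=
  let idx : Nat := (PySem.Int.mod |iv| 15).toNat
  let coeff := if PySem.Int.bitCount (PySem.Int.band st.1 (((1 : Int) <<< idx) - 1)) % 2 = 1
               then -st.2 else st.2
  (PySem.Int.bxor st.1 ((1 : Int) <<< idx), coeff)

def cl15_blade_alt (ivs : List Int) : List (Int × Int) :=
  let st := ivs.foldl cl15AltStep (0, 1)
  [st]

-- ===== PRECONDITION & SPEC =====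
def Spec_cl15_blade (ivs : List Int) (out : List (Int × Int)) : Prop := out = cl15_blade_alt ivs
instance (ivs : List Int) (out : List (Int × Int)) : Decidable (Spec_cl15_blade ivs out) := by unfold Spec_cl15_blade; infer_instance

-- ===== CLAIM (what is proved, stated in full; the proofs are below) =====
def Claim_equal_cl15_blade : Prop := ∀ (ivs : List Int), Dom_cl15_blade ivs → Spec_cl15_blade ivs (cl15_blade ivs)

-- ===== LEMMAS AND PROOFS =====

-- split a number at its lowest bit, modulo 2^(i+1)
lemma mod_pow_two_succ (m i : Nat) : m % 2^(i+1) = m % 2 + 2 * (m / 2 % 2^i) := by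
  have hp : 0 < 2^i := by positivity
  conv_lhs => rw [show m = m % 2 + 2*(m/2) from by omega]
  rw [pow_succ, mul_comm (2^i) 2, Nat.add_mod, Nat.mul_mod_mul_left,
    Nat.mod_eq_of_lt (a := m % 2) (by nlinarith [Nat.mod_lt m (show 0<2 by omega)]),
    Nat.mod_eq_of_lt]
  have := Nat.mod_lt (m/2) hp
  have := Nat.mod_lt m (show 0<2 by omega)
  omega

-- bitCount of b + 2*r (b the lowest bit)
lemma bitCount_bit (b r : Nat) (hb : b < 2) :
    PySem.Int.bitCount ((b + 2*r : Nat) : Int) = b + PySem.Int.bitCount (r : Int) := by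
  rcases Nat.eq_zero_or_pos (b + 2*r) with h | h
  · have hb0 : b = 0 := by omega
    have hr0 : r = 0 := by omega
    simp [hb0, hr0, PySem.Int.bitCount_zero]
  · rw [PySem.Int.bitCount_natCast h, show (b + 2*r) % 2 = b from by omega,
      show (b + 2*r) / 2 = r from by omega]

-- the sign loop's accumulator factors out multiplicatively
lemma foldl_sign_mul (C : Nat → Prop) [DecidablePred C] (l : List Nat) (s : Int) :
    l.foldl (fun a k => if C k then a * (-1) else a) s
      = s * l.foldl (fun a k => if C k then a * (-1) else a) 1 := by
  induction l generalizing s with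
  | nil => simp
  | cons x xs ih =>
    simp only [List.foldl_cons]
    by_cases h : C x
    · simp only [if_pos h]
      rw [ih (s * -1), ih (1 * -1)]; ring
    · simp only [if_neg h, one_mul]
      exact ih s

-- A's explicit sign loop equals the bit-count parity of m % 2^i
lemma sign_loop_parity (i : Nat) : ∀ m : Nat,
    (List.range i).foldl (fun s k => if (m &&& (1 <<< k) : Nat) ≠ 0 then s * (-1) else s) (1 : Int)
      = if PySem.Int.bitCount ((m % 2^i : Nat) : Int) % 2 = 1 then -1 else 1 := by
  induction i with
  | zero => intro m; simp [PySem.Int.bitCount_zero]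
  | succ i ih =>
    intro m
    rw [List.range_succ_eq_map, List.foldl_cons, List.foldl_map]
    have hcond : ∀ k, ((m &&& (1 <<< (k+1)) : Nat) ≠ 0) = ((m / 2 &&& (1 <<< k) : Nat) ≠ 0) := by
      intro k
      have h1 : (m &&& (1 <<< (k+1)) : Nat) = (m.testBit (k+1)).toNat * 2^(k+1) := by
        simpa [Nat.shiftLeft_eq] using Nat.and_two_pow m (k+1)
      have h2 : (m / 2 &&& (1 <<< k) : Nat) = ((m/2).testBit k).toNat * 2^k := by
        simpa [Nat.shiftLeft_eq] using Nat.and_two_pow (m/2) k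
      have h3 : m.testBit (k+1) = (m/2).testBit k := by
        simpa [Nat.div2_val] using Nat.testBit_succ m k
      rw [h1, h2, h3]
      rcases (m/2).testBit k with _ | _ <;> simp
    simp only [hcond]
    rw [foldl_sign_mul, ih (m/2), mod_pow_two_succ,
      bitCount_bit (m % 2) (m / 2 % 2^i) (Nat.mod_lt m (by omega))]
    rw [show (m &&& (1 <<< 0) : Nat) = m % 2 from Nat.and_one_is_mod m]
    -- the four parity cases
    rcases Nat.mod_two_eq_zero_or_one m with h | h <;>
      rcases Nat.mod_two_eq_zero_or_one (PySem.Int.bitCount ((m / 2 % 2^i : Nat) : Int)) with h2 | h2 <;>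
      simp [h] <;> split_ifs with g <;> omega

-- bridge: cl15Sign on a natural mask, in terms of bitCount of the low bits
lemma cl15Sign_eq (m i : Nat) :
    cl15Sign (m : Int) i
      = if PySem.Int.bitCount ((m &&& (2^i - 1) : Nat) : Int) % 2 = 1 then -1 else 1 := by
  unfold cl15Sign
  rw [PySem.List.pyRange_one, List.foldl_map, Nat.and_two_pow_sub_one_eq_mod,
    show ((i : Int) - 0).toNat = i from by simp]
  refine (PySem.List.foldl_congr_mem _ _ (fun (s : Int) (k : Nat) =>
      if (m &&& (1 <<< k) : Nat) ≠ 0 then s * (-1) else s) _ ?_).trans (sign_loop_parity i m)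
  intro a x _
  rw [show ((0 : Int) + (x : Int)).toNat = x from by simp,
    Int.shiftLeft_natCast_right]
  have : ((1 : Int) <<< x) = ((1 <<< x : Nat) : Int) := by
    simp [Int.natCast_shiftLeft]
  rw [this, PySem.Int.band_natCast]
  simp

-- one loop step: A's dict step on the singleton {m: c} is B's step on (m, c)
lemma step_singleton (m : Nat) (c : Int) (hc : c = 1 ∨ c = -1) (iv : Int) :
    cl15Step (PySem.Dict.ofList [((m : Int), c)]) iv
      = PySem.Dict.ofList [cl15AltStep ((m : Int), c) iv]
    ∧ ∃ m' : Nat, (cl15AltStep ((m : Int), c) iv).1 = (m' : Int)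
    ∧ ((cl15AltStep ((m : Int), c) iv).2 = 1 ∨ (cl15AltStep ((m : Int), c) iv).2 = -1) := by
  set i : Nat := (PySem.Int.mod |iv| 15).toNat with hi
  have hblade : ((1 : Int) <<< i) = ((1 <<< i : Nat) : Int) := by simp [Int.natCast_shiftLeft]
  have hxor : PySem.Int.bxor (m : Int) ((1 : Int) <<< i) = (((m ^^^ (1 <<< i) : Nat)) : Int) := by
    rw [hblade, PySem.Int.bxor_natCast]
  have hbm1 : (((1 : Int) <<< i) - 1) = (((2^i - 1 : Nat)) : Int) := by
    rw [hblade, Nat.shiftLeft_eq, one_mul]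
    have : 1 ≤ 2^i := Nat.one_le_two_pow
    push_cast [this]; ring
  have hband : PySem.Int.band (m : Int) (((1 : Int) <<< i) - 1)
      = ((m &&& (2^i - 1) : Nat) : Int) := by
    rw [hbm1, PySem.Int.band_natCast]
  set P : Prop := PySem.Int.bitCount ((m &&& (2^i - 1) : Nat) : Int) % 2 = 1 with hP
  have halt : cl15AltStep ((m : Int), c) iv
      = (((m ^^^ (1 <<< i) : Nat) : Int), if P then -c else c) := by
    unfold cl15AltStep
    simp only [← hi, hband, hxor, hP]
  have hsign : cl15Sign (m : Int) i = if P then -1 else 1 := cl15Sign_eq m i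
  have hcs : c * (if P then (-1 : Int) else 1) = if P then -c else c := by
    split_ifs <;> ring
  have hne : (if P then -c else c) ≠ 0 := by
    rcases hc with h | h <;> split_ifs <;> simp [h]
  constructor
  · unfold cl15Step cl15Inner
    simp only [← hi]
    rw [halt]
    simp [PySem.Dict.ofList, PySem.Dict.update, PySem.Dict.empty, PySem.Dict.insert,
      PySem.Dict.contains, PySem.Dict.getD, PySem.Dict.get?,
      hsign, hxor, hcs, hne]
  · exact ⟨m ^^^ (1 <<< i), by rw [halt], by rw [halt]; rcases hc with h | h <;> rw [h] <;> split_ifs <;> simp⟩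

-- the whole loop, by induction on ivs with the singleton invariant
lemma loop_eq : ∀ (ivs : List Int) (m : Nat) (c : Int), (c = 1 ∨ c = -1) →
    ivs.foldl cl15Step (PySem.Dict.ofList [((m : Int), c)])
      = PySem.Dict.ofList [ivs.foldl cl15AltStep ((m : Int), c)] := by
  intro ivs
  induction ivs with
  | nil => intro m c _; rfl
  | cons iv ivs ih =>
    intro m c hc
    obtain ⟨hstep, m', hm', hc'⟩ := step_singleton m c hc iv
    simp only [List.foldl_cons, hstep]
    have : cl15AltStep ((m : Int), c) iv
        = ((m' : Int), (cl15AltStep ((m : Int), c) iv).2) := by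
      rw [← hm']
    rw [this]
    exact ih m' _ hc'

-- ===== VERDICT (by name: the statement is the Claim_ definition above) =====
theorem cl15_blade_spec : Claim_equal_cl15_blade := by
  intro ivs _
  unfold Spec_cl15_blade cl15_blade cl15_blade_alt
  have h := loop_eq ivs 0 1 (Or.inl rfl)
  simp only [Nat.cast_zero] at h
  rw [h]
  rfl
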